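-- pv_equiv track=rewrite | github.com/singhaltanmay/gamebot | Chess.py | diff_squares
-- ===== SOURCE A (Python) =====
-- def count(list):
--     m = {}
--     for i in list:
--         if i in m:
--             m[i] = m[i] + 1
--         else:
--             m[i] = 1
--     return m
--
-- def diff_squares(list):
--     l = []
--     for i in list:
--         l.append(i[0:1])
--     to_stop = True
--     x = count(l)
--     for i in x:
--         if x[i] > 1:
--             to_stop = False
--     if to_stop == True:
--         return l
--     else:
--         l = []
--         for i in list:
--             l.append(i[-1:])
--         to_stop = True
--         x = count(l)
--         for i in x:
--             if x[i] > 1: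
--                 to_stop = False
--         if to_stop == True:
--             return l
--         else:
--             return list
-- ===== SOURCE B (Python) =====
-- def diff_squares(list):
--     # single fused pass: build both projections and detect duplicates on the fly
--     firsts, lasts = [], []
--     seen_f, seen_l = set(), set()
--     dup_f = dup_l = False
--     for i in list:
--         f, t = i[0:1], i[-1:]
--         dup_f = dup_f or f in seen_f
--         dup_l = dup_l or t in seen_l
--         seen_f.add(f)
--         seen_l.add(t)
--         firsts.append(f)
--         lasts.append(t)
--     if not dup_f:
--         return firsts
--     if not dup_l:
--         return lasts
--     return list
-- ===== Notes on version B (the rewrite author's own statement) =====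
-- stated objective: alternative
-- what changed: One fused pass over the input maintains both projection lists, two seen-sets and two incremental duplicate flags, replacing A's six staged passes (build firsts, build a count dict, scan the dict, then the same three again for lasts).
import Mathlib
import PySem

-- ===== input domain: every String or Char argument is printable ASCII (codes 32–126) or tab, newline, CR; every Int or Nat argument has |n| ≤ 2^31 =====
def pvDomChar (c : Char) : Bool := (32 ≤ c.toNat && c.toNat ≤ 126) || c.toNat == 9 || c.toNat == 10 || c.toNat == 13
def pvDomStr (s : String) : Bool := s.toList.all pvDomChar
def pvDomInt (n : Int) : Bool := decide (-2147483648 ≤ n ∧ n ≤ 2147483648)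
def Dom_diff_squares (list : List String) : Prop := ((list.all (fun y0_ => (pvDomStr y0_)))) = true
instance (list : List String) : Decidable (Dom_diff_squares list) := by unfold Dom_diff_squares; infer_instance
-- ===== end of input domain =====

-- B fuses A's six staged passes (build firsts; count dict; scan dict; same again for lasts) into ONE pass
-- maintaining both projection lists, two seen-sets and two incremental duplicate flags.

-- ===== PORT A =====
-- A's helper 'count': build a frequency dict by a loop
def pvCount (l : List String) : PySem.Dict String Int :=
  l.foldl (fun m i => if m.contains i then m.insert i (m.getD i 0 + 1) else m.insert i 1)
    PySem.Dict.empty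

def diff_squares (list : List String) : List String :=
  let l := list.foldl (fun acc i => acc ++ [PySem.Str.slice i (some 0) (some 1)]) []
  let x := pvCount l
  let to_stop := x.keys.foldl (fun st i => if x.getD i 0 > 1 then false else st) true
  if to_stop = true then l
  else
    let l2 := list.foldl (fun acc i => acc ++ [PySem.Str.slice i (some (-1)) none]) []
    let x2 := pvCount l2
    let to_stop2 := x2.keys.foldl (fun st i => if x2.getD i 0 > 1 then false else st) true
    if to_stop2 = true then l2 else list

-- ===== PORT B =====
-- one fused pass; state = ((firsts, seen_f, dup_f), (lasts, seen_l, dup_l))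
def diff_squares_alt (list : List String) : List String :=
  let st := list.foldl
    (fun (s : (List String × PySem.Set String × Bool) × (List String × PySem.Set String × Bool)) i =>
      ((s.1.1 ++ [PySem.Str.slice i (some 0) (some 1)],
        PySem.Set.add s.1.2.1 (PySem.Str.slice i (some 0) (some 1)),
        s.1.2.2 || PySem.Set.contains s.1.2.1 (PySem.Str.slice i (some 0) (some 1))),
       (s.2.1 ++ [PySem.Str.slice i (some (-1)) none,],
        PySem.Set.add s.2.2.1 (PySem.Str.slice i (some (-1)) none),
        s.2.2.2 || PySem.Set.contains s.2.2.1 (PySem.Str.slice i (some (-1)) none))))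
    (([], [], false), ([], [], false))
  if st.1.2.2 = false then st.1.1
  else if st.2.2.2 = false then st.2.1
  else list

-- ===== PRECONDITION & SPEC =====
def Spec_diff_squares (list : List String) (out : List String) : Prop := out = diff_squares_alt list
instance (list : List String) (out : List String) : Decidable (Spec_diff_squares list out) := by unfold Spec_diff_squares; infer_instance

-- ===== CLAIM (what is proved, stated in full; the proofs are below) =====
def Claim_equal_diff_squares : Prop := ∀ (list : List String), Dom_diff_squares list → Spec_diff_squares list (diff_squares list)

-- ===== LEMMAS AND PROOFS =====

-- A's count helper is Counter
theorem pvCount_eq_counter (l : List String) : pvCount l = PySem.Dict.counter l := by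
  have hstep : (fun (m : PySem.Dict String Int) i =>
      if m.contains i then m.insert i (m.getD i 0 + 1) else m.insert i 1)
      = fun m i => m.insert i (m.getD i 0 + 1) := by
    funext m i
    by_cases h : m.contains i = true
    · simp [h]
    · have h0 : m.getD i 0 = 0 :=
        PySem.Dict.getD_of_not_contains m 0 (by simpa using h)
      simp [h, h0]
  unfold pvCount
  rw [hstep, PySem.Dict.foldl_insert_getD_add_one_eq_counter]

-- the false-latch scan
theorem foldl_latch {α : Type} (P : α → Prop) [DecidablePred P] (ks : List α) (b : Bool) :
    ks.foldl (fun st k => if P k then false else st) b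
      = (b && ks.all (fun k => !decide (P k))) := by
  induction ks generalizing b with
  | nil => simp
  | cons k ks ih =>
    rw [List.foldl_cons, ih]
    by_cases h : P k <;> simp [h]

-- A's to_stop condition on a list l is exactly l.Nodup
theorem toStop_eq_nodup (l : List String) :
    ((pvCount l).keys.foldl (fun st i => if (pvCount l).getD i 0 > 1 then false else st) true)
      = decide l.Nodup := by
  rw [pvCount_eq_counter, foldl_latch, PySem.Dict.keys_counter]
  simp only [Bool.true_and]
  rcases Bool.eq_false_or_eq_true (decide l.Nodup) with h | h
  · rw [h]
    have hnd : l.Nodup := by simpa using h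
    rw [List.all_eq_true]
    intro k _
    have : l.count k ≤ 1 := List.nodup_iff_count_le_one.1 hnd k
    simp [PySem.Dict.getD_counter]
    exact_mod_cast this
  · rw [h]
    have hnd : ¬ l.Nodup := by simpa using h
    rw [List.nodup_iff_count_le_one] at hnd
    push Not at hnd
    obtain ⟨a, ha⟩ := hnd
    have hmem : a ∈ l := by
      by_contra hna
      simp [List.count_eq_zero_of_not_mem hna] at ha
    rw [List.all_eq_false]
    refine ⟨a, ?_, ?_⟩
    · simpa [PySem.Set.mem_ofList] using hmem
    · simp [PySem.Dict.getD_counter]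
      exact_mod_cast ha

-- Set.add keeps Nodup
theorem set_add_nodup {s : PySem.Set String} (hs : s.Nodup) (x : String) :
    (PySem.Set.add s x).Nodup := by
  by_cases hx : x ∈ s
  · simpa [PySem.Set.add, hx] using hs
  · simp [PySem.Set.add, hx, List.nodup_append, hs]
    exact fun a ha h => hx (h ▸ ha)

-- invariant of one projection's third of B's fused loop
theorem scan_inv (f : String → String) (l : List String)
    (out : List String) (s : PySem.Set String) (d : Bool) (hs : s.Nodup) :
    l.foldl (fun (a : List String × PySem.Set String × Bool) i =>
        (a.1 ++ [f i], PySem.Set.add a.2.1 (f i), a.2.2 || PySem.Set.contains a.2.1 (f i)))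
      (out, s, d)
    = (out ++ l.map f, PySem.Set.update s (l.map f), d || !decide ((s ++ l.map f).Nodup)) := by
  induction l generalizing out s d with
  | nil => simp [PySem.Set.update, hs]
  | cons i l ih =>
    rw [List.foldl_cons, ih _ _ _ (set_add_nodup hs (f i))]
    by_cases hmem : f i ∈ s
    · have hadd : PySem.Set.add s (f i) = s := by simp [PySem.Set.add, hmem]
      have hnd : ¬ (s ++ (f i :: l.map f)).Nodup := by
        intro hn
        rcases List.nodup_append.mp hn with ⟨_, _, hdisj⟩
        exact hdisj _ hmem _ (by simp) rfl
      simp [PySem.Set.update, hnd, hmem]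
    · have hadd : PySem.Set.add s (f i) = s ++ [f i] := by simp [PySem.Set.add, hmem]
      have hre : (s ++ [f i]) ++ l.map f = s ++ (f i :: l.map f) := by simp
      simp [PySem.Set.update, hre, hmem]
      rfl

-- ===== VERDICT (by name: the statement is the Claim_ definition above) =====
theorem diff_squares_spec : Claim_equal_diff_squares := by
  intro list _
  unfold Spec_diff_squares diff_squares diff_squares_alt
  rw [PySem.List.foldl_prod_mk
    (f := fun (a : List String × PySem.Set String × Bool) i =>
        (a.1 ++ [PySem.Str.slice i (some 0) (some 1)],
         PySem.Set.add a.2.1 (PySem.Str.slice i (some 0) (some 1)),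
         a.2.2 || PySem.Set.contains a.2.1 (PySem.Str.slice i (some 0) (some 1))))
    (g := fun (a : List String × PySem.Set String × Bool) i =>
        (a.1 ++ [PySem.Str.slice i (some (-1)) none],
         PySem.Set.add a.2.1 (PySem.Str.slice i (some (-1)) none),
         a.2.2 || PySem.Set.contains a.2.1 (PySem.Str.slice i (some (-1)) none)))]
  rw [scan_inv _ _ _ _ _ (by simp), scan_inv _ _ _ _ _ (by simp)]
  simp only [PySem.List.foldl_append_singleton_eq_map, List.nil_append, toStop_eq_nodup]
  by_cases h1 : (list.map (fun i => PySem.Str.slice i (some 0) (some 1))).Nodup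
  · simp [h1]
  · by_cases h2 : (list.map (fun i => PySem.Str.slice i (some (-1)) none)).Nodup
    · simp [h1, h2]
    · simp [h1, h2]
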